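-- pv_equiv track=rewrite | github.com/dakshhkhatri/1696_TAFL | app.py | productive_states
-- ===== SOURCE A (Python) =====
-- from collections import deque, defaultdict
--
-- def productive_states(accept_states, transitions):
--     rg = defaultdict(list)
--     for t in transitions:
--         rg[t['to']].append(t['from'])
--
--     vis = set(accept_states)
--     q = deque(accept_states)
--
--     while q:
--         u = q.popleft()
--         for v in rg[u]:
--             if v not in vis:
--                 vis.add(v)
--                 q.append(v)
--
--     return vis
-- ===== SOURCE B (Python) =====
-- def productive_states(accept_states, transitions):
--     vis = set(accept_states)
--     frontier = list(accept_states)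
--     while frontier:
--         nxt = []
--         for u in frontier:
--             for t in transitions:
--                 if t['to'] == u and t['from'] not in vis:
--                     vis.add(t['from'])
--                     nxt.append(t['from'])
--         frontier = nxt
--     return vis
-- ===== Notes on version B (the rewrite author's own statement) =====
-- stated objective: simpler
-- what changed: B drops the defaultdict reverse-adjacency index and the deque entirely: it expands the reachable set level by level, keeping a frontier list and building the next frontier by rescanning the raw transitions list for each frontier state, until a level adds nothing.
import Mathlib
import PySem

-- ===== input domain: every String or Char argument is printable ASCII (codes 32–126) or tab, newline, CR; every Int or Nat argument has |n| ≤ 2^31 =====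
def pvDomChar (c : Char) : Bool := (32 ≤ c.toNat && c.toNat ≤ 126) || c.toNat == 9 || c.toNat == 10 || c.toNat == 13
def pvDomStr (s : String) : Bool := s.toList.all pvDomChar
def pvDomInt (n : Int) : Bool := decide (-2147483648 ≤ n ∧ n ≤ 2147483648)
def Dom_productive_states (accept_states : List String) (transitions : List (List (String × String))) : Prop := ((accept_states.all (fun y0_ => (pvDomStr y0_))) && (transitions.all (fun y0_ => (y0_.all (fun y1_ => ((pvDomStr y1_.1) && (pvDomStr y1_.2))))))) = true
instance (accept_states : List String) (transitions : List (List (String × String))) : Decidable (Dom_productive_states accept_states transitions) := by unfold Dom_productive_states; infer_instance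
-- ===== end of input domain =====

-- B is simpler: it drops the defaultdict reverse-adjacency index and the deque, expanding the
-- reachable set level by level (frontier / next-frontier lists) by rescanning the raw
-- transitions list, until a level adds nothing. Same return value (a set).

-- ===== PORT A =====
-- t['to'] / t['from'] on the transition dict; outside Pre_ (a missing key) Python raises KeyError,
-- the port's .getD "" default is never reached by the claim.
def pvTo (t : List (String × String)) : String := ((PySem.Dict.mk t).get? "to").getD ""

def pvFrom (t : List (String × String)) : String := ((PySem.Dict.mk t).get? "from").getD ""

-- rg = defaultdict(list); for t in transitions: rg[t['to']].append(t['from'])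
def pvBuildRG (transitions : List (List (String × String))) : PySem.Dict String (List String) :=
  transitions.foldl (fun rg t => rg.modify (pvTo t) [] (fun l => l ++ [pvFrom t])) PySem.Dict.empty

-- the while-q BFS loop; fuel = |accept_states| + |transitions| bounds the number of pops
-- (each append adds a distinct 'from' value to vis), so the guard never fires.
def pvBFS (rg : PySem.Dict String (List String)) :
    Nat → List String → PySem.Set String → PySem.Set String
  | 0, _, vis => vis
  | _ + 1, [], vis => vis
  | fuel + 1, u :: q, vis =>
      let s := (rg.getD u []).foldl
        (fun (s : PySem.Set String × List String) v =>
          if PySem.Set.contains s.1 v then s else (PySem.Set.add s.1 v, s.2 ++ [v]))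
        (vis, q)
      pvBFS rg fuel s.2 s.1

def productive_states (accept_states : List String) (transitions : List (List (String × String))) : List String :=
  pvBFS (pvBuildRG transitions) (accept_states.length + transitions.length)
    accept_states (PySem.Set.ofList accept_states)

-- ===== PORT B =====
-- the while-frontier loop of Source B: for each frontier state u the raw transitions list is scanned
-- and new states are collected into the next frontier. fuel = |accept| + |transitions| + 1 bounds
-- the number of loop iterations (every non-final frontier is nonempty and frontier elements are
-- pairwise-distinct fresh vis additions), so the fuel guard never fires.
def pvLayers (transitions : List (List (String × String))) :
    Nat → List String → PySem.Set String → PySem.Set String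
  | 0, _, vis => vis
  | fuel + 1, frontier, vis =>
      if frontier.isEmpty then vis
      else
        let s := frontier.foldl
          (fun (s : PySem.Set String × List String) u =>
            transitions.foldl
              (fun (s : PySem.Set String × List String) t =>
                if (pvTo t == u) && !(PySem.Set.contains s.1 (pvFrom t)) then
                  (PySem.Set.add s.1 (pvFrom t), s.2 ++ [pvFrom t])
                else s) s)
          (vis, [])
        pvLayers transitions fuel s.2 s.1

def productive_states_alt (accept_states : List String) (transitions : List (List (String × String))) : List String :=
  pvLayers transitions (accept_states.length + transitions.length + 1)
    accept_states (PySem.Set.ofList accept_states)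

-- ===== PRECONDITION & SPEC =====
-- Pre_ excludes exactly the inputs on which A raises KeyError: a transition dict missing key 'to' or 'from'.
def Pre_productive_states (accept_states : List String) (transitions : List (List (String × String))) : Prop :=
  ∀ t ∈ transitions, (PySem.Dict.mk t).contains "to" = true ∧ (PySem.Dict.mk t).contains "from" = true

instance (accept_states : List String) (transitions : List (List (String × String))) : Decidable (Pre_productive_states accept_states transitions) := by unfold Pre_productive_states; infer_instance

def pvWitness_productive_states : List String × (List (List (String × String))) :=
  (["q2"], [[("from", "q0"), ("to", "q1")], [("from", "q1"), ("to", "q2")]])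

def Spec_productive_states (accept_states : List String) (transitions : List (List (String × String))) (out : List String) : Prop := out = productive_states_alt accept_states transitions
instance (accept_states : List String) (transitions : List (List (String × String))) (out : List String) : Decidable (Spec_productive_states accept_states transitions out) := by unfold Spec_productive_states; infer_instance

-- ===== CLAIM (what is proved, stated in full; the proofs are below) =====
def Claim_equal_productive_states : Prop := ∀ (accept_states : List String) (transitions : List (List (String × String))), Dom_productive_states accept_states transitions → Pre_productive_states accept_states transitions → Spec_productive_states accept_states transitions (productive_states accept_states transitions)

-- ===== LEMMAS AND PROOFS =====

-- proof-side intermediate: A's BFS step with rg[u] replaced by a scan of the raw transitions.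
def pvStep (transitions : List (List (String × String)))
    (s : PySem.Set String × List String) (u : String) : PySem.Set String × List String :=
  transitions.foldl
    (fun (s : PySem.Set String × List String) t =>
      if pvTo t == u then
        if PySem.Set.contains s.1 (pvFrom t) then s
        else (PySem.Set.add s.1 (pvFrom t), s.2 ++ [pvFrom t])
      else s) s

-- proof-side intermediate: A's queue BFS, expressed with pvStep.
def pvScan (transitions : List (List (String × String))) :
    Nat → List String → PySem.Set String → PySem.Set String
  | 0, _, vis => vis
  | _ + 1, [], vis => vis
  | fuel + 1, u :: q, vis =>
      let s := pvStep transitions (vis, q) u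
      pvScan transitions fuel s.2 s.1

-- proof-side: one whole layer of B = pvStep folded over the frontier.
def pvExpand (transitions : List (List (String × String)))
    (f : List String) (s : PySem.Set String × List String) : PySem.Set String × List String :=
  f.foldl (pvStep transitions) s

-- rg[u] is exactly the 'from' fields of the transitions into u, in list order.
theorem pvBuildRG_getD (transitions : List (List (String × String))) (u : String) :
    (pvBuildRG transitions).getD u []
      = ((transitions.map (fun t => (pvTo t, pvFrom t))).filter (fun p => p.1 == u)).map (·.2) := by
  unfold pvBuildRG
  have h := @List.foldl_map (List (String × String)) (String × String)
      (PySem.Dict String (List String)) (fun t => (pvTo t, pvFrom t))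
      (fun d p => d.modify p.1 [] (fun l => l ++ [p.2])) transitions PySem.Dict.empty
  rw [show transitions.foldl (fun rg t => rg.modify (pvTo t) [] (fun l => l ++ [pvFrom t]))
        PySem.Dict.empty
      = ((transitions.map (fun t => (pvTo t, pvFrom t))).foldl
          (fun (d : PySem.Dict String (List String)) p => d.modify p.1 [] (fun l => l ++ [p.2]))
          PySem.Dict.empty) from h.symm]
  rw [PySem.Dict.getD_foldl_modify_append]
  simp [PySem.Dict.getD_empty]

-- folding A's inner body over rg[u] = scanning all transitions with the 'to == u' guard (pvStep).
theorem pvInner_eq (transitions : List (List (String × String))) (u : String)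
    (s : PySem.Set String × List String) :
    (((transitions.map (fun t => (pvTo t, pvFrom t))).filter (fun p => p.1 == u)).map (·.2)).foldl
        (fun (s : PySem.Set String × List String) v =>
          if PySem.Set.contains s.1 v then s else (PySem.Set.add s.1 v, s.2 ++ [v])) s
      = pvStep transitions s u := by
  unfold pvStep
  induction transitions generalizing s with
  | nil => rfl
  | cons t ts ih =>
      simp only [List.map_cons, List.filter_cons, List.foldl_cons]
      by_cases h : pvTo t = u
      · simp only [h, BEq.rfl, if_true, List.map_cons, List.foldl_cons]
        exact ih _
      · have hb : (pvTo t == u) = false := by simp [h]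
        simp only [hb, if_false, Bool.false_eq_true]
        exact ih s

theorem pvBFS_eq_pvScan (transitions : List (List (String × String)))
    (fuel : Nat) (q : List String) (vis : PySem.Set String) :
    pvBFS (pvBuildRG transitions) fuel q vis = pvScan transitions fuel q vis := by
  induction fuel generalizing q vis with
  | zero => rfl
  | succ n ih =>
      cases q with
      | nil => rfl
      | cons u q =>
          simp only [pvBFS, pvScan, pvBuildRG_getD, pvInner_eq]
          exact ih _ _

-- B's inner fold body ('to == u and from not in vis') is pvStep's nested-if body, pointwise.
theorem pvBody_eq (u : String) (s : PySem.Set String × List String) (t : List (String × String)) :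
    (if (pvTo t == u) && !(PySem.Set.contains s.1 (pvFrom t)) then
        (PySem.Set.add s.1 (pvFrom t), s.2 ++ [pvFrom t])
      else s)
      = (if pvTo t == u then
          if PySem.Set.contains s.1 (pvFrom t) then s
          else (PySem.Set.add s.1 (pvFrom t), s.2 ++ [pvFrom t])
        else s) := by
  cases h1 : (pvTo t == u) <;> cases h2 : PySem.Set.contains s.1 (pvFrom t) <;> simp

-- B's double fold is pvExpand.
theorem pvLayersFold_eq (transitions : List (List (String × String))) (f : List String)
    (s : PySem.Set String × List String) :
    f.foldl
        (fun (s : PySem.Set String × List String) u =>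
          transitions.foldl
            (fun (s : PySem.Set String × List String) t =>
              if (pvTo t == u) && !(PySem.Set.contains s.1 (pvFrom t)) then
                (PySem.Set.add s.1 (pvFrom t), s.2 ++ [pvFrom t])
              else s) s) s
      = pvExpand transitions f s := by
  unfold pvExpand
  refine PySem.List.foldl_congr_mem f _ _ s (fun acc u _ => ?_)
  unfold pvStep
  exact PySem.List.foldl_congr_mem transitions _ _ acc (fun a t _ => pvBody_eq u a t)

-- pvStep only appends to the list component; its effect factors through an empty accumulator.
theorem pvStep_append (transitions : List (List (String × String))) (u : String) :
    ∀ (vis : PySem.Set String) (l₁ l₂ : List String),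
      pvStep transitions (vis, l₁ ++ l₂) u
        = ((pvStep transitions (vis, l₂) u).1, l₁ ++ (pvStep transitions (vis, l₂) u).2) := by
  induction transitions with
  | nil => intro vis l₁ l₂; rfl
  | cons t ts ih =>
      intro vis l₁ l₂
      simp only [pvStep, List.foldl_cons]
      by_cases h1 : (pvTo t == u) = true
      · by_cases h2 : PySem.Set.contains vis (pvFrom t) = true
        · simp only [h1, h2, if_true]
          exact ih vis l₁ l₂
        · simp only [Bool.not_eq_true] at h2
          simp only [h1, h2, Bool.false_eq_true, if_true, if_false]
          have := ih (PySem.Set.add vis (pvFrom t)) l₁ (l₂ ++ [pvFrom t])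
          simpa [pvStep, List.append_assoc] using this
      · simp only [Bool.not_eq_true] at h1
        simp only [h1, Bool.false_eq_true, if_false]
        exact ih vis l₁ l₂

-- and so does a whole layer.
theorem pvExpand_append (transitions : List (List (String × String))) (f : List String) :
    ∀ (vis : PySem.Set String) (l₁ l₂ : List String),
      pvExpand transitions f (vis, l₁ ++ l₂)
        = ((pvExpand transitions f (vis, l₂)).1, l₁ ++ (pvExpand transitions f (vis, l₂)).2) := by
  induction f with
  | nil => intro vis l₁ l₂; rfl
  | cons u f ih =>
      intro vis l₁ l₂
      simp only [pvExpand, List.foldl_cons]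
      rw [pvStep_append transitions u vis l₁ l₂]
      have h := ih (pvStep transitions (vis, l₂) u).1 l₁ (pvStep transitions (vis, l₂) u).2
      simpa [pvExpand] using h

-- queue BFS processes a whole layer f exactly as pvExpand does, in |f| pops.
theorem pvScan_layer (transitions : List (List (String × String))) (f : List String) :
    ∀ (n : Nat) (p : List String) (vis : PySem.Set String),
      pvScan transitions (f.length + n) (f ++ p) vis
        = pvScan transitions n (p ++ (pvExpand transitions f (vis, [])).2)
            (pvExpand transitions f (vis, [])).1 := by
  induction f with
  | nil => intro n p vis; simp [pvExpand]
  | cons u f ih =>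
      intro n p vis
      have hq : (u :: f).length + n = (f.length + n) + 1 := by simp [List.length_cons]; omega
      rw [hq]
      show pvScan transitions (f.length + n)
          (pvStep transitions (vis, f ++ p) u).2 (pvStep transitions (vis, f ++ p) u).1 = _
      have hstep : pvStep transitions (vis, f ++ p) u
          = ((pvStep transitions (vis, []) u).1, (f ++ p) ++ (pvStep transitions (vis, []) u).2) := by
        have := pvStep_append transitions u vis (f ++ p) []
        simpa using this
      rw [hstep]
      have hrec := ih n (p ++ (pvStep transitions (vis, []) u).2) (pvStep transitions (vis, []) u).1
      rw [show (f ++ p) ++ (pvStep transitions (vis, []) u).2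
            = f ++ (p ++ (pvStep transitions (vis, []) u).2) from by simp, hrec]
      have hE : pvExpand transitions (u :: f) (vis, [])
          = ((pvExpand transitions f ((pvStep transitions (vis, []) u).1, [])).1,
              (pvStep transitions (vis, []) u).2
                ++ (pvExpand transitions f ((pvStep transitions (vis, []) u).1, [])).2) := by
        show pvExpand transitions f (pvStep transitions (vis, []) u) = _
        have := pvExpand_append transitions f (pvStep transitions (vis, []) u).1
          (pvStep transitions (vis, []) u).2 []
        simpa using this
      rw [hE]
      simp [List.append_assoc]

-- potential: number of transition sources not yet in vis; it pays for every future queue append.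
def pvPot (transitions : List (List (String × String))) (vis : PySem.Set String) : Nat :=
  (transitions.map pvFrom).countP (fun v => !(PySem.Set.contains vis v))

theorem countP_lt_of_mem {α : Type} {v : α} {l : List α} {p q : α → Bool}
    (hv : v ∈ l) (hp : p v = true) (hq : q v = false) (h : ∀ x, q x = true → p x = true) :
    l.countP q < l.countP p := by
  induction l with
  | nil => cases hv
  | cons a l ih =>
      rcases List.mem_cons.mp hv with rfl | hv'
      · have hle : l.countP q ≤ l.countP p := List.countP_mono_left (fun x _ => h x)
        simp [hp, hq]
        omega
      · have hlt := ih hv'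
        have hcase : (if q a = true then 1 else 0) ≤ (if p a = true then 1 else 0) := by
          by_cases hqa : q a = true
          · simp [hqa, h a hqa]
          · by_cases hpa : p a = true <;> simp [hqa, hpa]
        simp only [List.countP_cons]
        omega

-- adding a fresh transition source strictly decreases the potential.
theorem pvPot_add (transitions : List (List (String × String))) (vis : PySem.Set String)
    (v : String) (hv : v ∈ transitions.map pvFrom) (hnc : PySem.Set.contains vis v = false) :
    pvPot transitions (PySem.Set.add vis v) < pvPot transitions vis := by
  unfold pvPot
  have hmem : v ∉ vis := by simpa [PySem.Set.contains] using hnc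
  refine countP_lt_of_mem hv (by simp [PySem.Set.contains, hmem]) ?_ ?_
  · simp [PySem.Set.add, PySem.Set.contains, hmem]
  · intro x hx
    simp only [Bool.not_eq_true'] at hx ⊢
    simp only [PySem.Set.add, PySem.Set.contains] at hx ⊢
    simp only [List.contains_eq_mem, decide_eq_false_iff_not] at hx ⊢
    intro hxin
    exact hx (by simp [hmem, hxin])

-- queue length + potential never grows across a pvStep.
theorem pvStep_measure (transitions : List (List (String × String))) (u : String) :
    ∀ (ts : List (List (String × String))), (∀ t ∈ ts, t ∈ transitions) →
    ∀ (s : PySem.Set String × List String),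
      (ts.foldl
          (fun (s : PySem.Set String × List String) t =>
            if pvTo t == u then
              if PySem.Set.contains s.1 (pvFrom t) then s
              else (PySem.Set.add s.1 (pvFrom t), s.2 ++ [pvFrom t])
            else s) s).2.length
        + pvPot transitions
            (ts.foldl
              (fun (s : PySem.Set String × List String) t =>
                if pvTo t == u then
                  if PySem.Set.contains s.1 (pvFrom t) then s
                  else (PySem.Set.add s.1 (pvFrom t), s.2 ++ [pvFrom t])
                else s) s).1
        ≤ s.2.length + pvPot transitions s.1 := by
  intro ts
  induction ts with
  | nil => intro _ s; exact Nat.le_refl _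
  | cons t ts ih =>
      intro hmem s
      have hts : ∀ t' ∈ ts, t' ∈ transitions := fun t' h => hmem t' (List.mem_cons_of_mem t h)
      simp only [List.foldl_cons]
      by_cases h1 : (pvTo t == u) = true
      · by_cases h2 : PySem.Set.contains s.1 (pvFrom t) = true
        · simp only [h1, h2, if_true]; exact ih hts s
        · have h2' : PySem.Set.contains s.1 (pvFrom t) = false := by
            simpa using h2
          simp only [h1, h2', if_true, Bool.false_eq_true, if_false]
          have hdec := pvPot_add transitions s.1 (pvFrom t)
            (List.mem_map_of_mem (hmem t List.mem_cons_self)) h2'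
          have := ih hts (PySem.Set.add s.1 (pvFrom t), s.2 ++ [pvFrom t])
          simp only [List.length_append, List.length_cons, List.length_nil] at this ⊢
          omega
      · simp only [Bool.not_eq_true] at h1
        simp only [h1, Bool.false_eq_true, if_false]
        exact ih hts s

theorem pvStep_nu (transitions : List (List (String × String))) (u : String)
    (s : PySem.Set String × List String) :
    (pvStep transitions s u).2.length + pvPot transitions (pvStep transitions s u).1
      ≤ s.2.length + pvPot transitions s.1 := by
  unfold pvStep
  exact pvStep_measure transitions u transitions (fun _ h => h) s

theorem pvExpand_nu (transitions : List (List (String × String))) (f : List String) :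
    ∀ (s : PySem.Set String × List String),
      (pvExpand transitions f s).2.length + pvPot transitions (pvExpand transitions f s).1
        ≤ s.2.length + pvPot transitions s.1 := by
  induction f with
  | nil => intro s; exact Nat.le_refl _
  | cons u f ih =>
      intro s
      simp only [pvExpand, List.foldl_cons]
      exact le_trans (ih (pvStep transitions s u)) (pvStep_nu transitions u s)

theorem pvScan_nil (transitions : List (List (String × String))) (fuel : Nat)
    (vis : PySem.Set String) : pvScan transitions fuel [] vis = vis := by
  cases fuel <;> rfl

-- fuel adequacy: any two fuels ≥ |q| + potential give the same result.
theorem pvScan_fuel (transitions : List (List (String × String))) :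
    ∀ (fuel₁ fuel₂ : Nat) (q : List String) (vis : PySem.Set String),
      q.length + pvPot transitions vis ≤ fuel₁ → q.length + pvPot transitions vis ≤ fuel₂ →
      pvScan transitions fuel₁ q vis = pvScan transitions fuel₂ q vis := by
  intro fuel₁
  induction fuel₁ with
  | zero =>
      intro fuel₂ q vis h1 _
      have hq : q = [] := by
        cases q with
        | nil => rfl
        | cons a q => simp [List.length_cons] at h1
      subst hq
      rw [pvScan_nil, pvScan_nil]
  | succ n ih =>
      intro fuel₂ q vis h1 h2
      cases q with
      | nil => rw [pvScan_nil, pvScan_nil]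
      | cons u q =>
          cases fuel₂ with
          | zero => simp [List.length_cons] at h2
          | succ m =>
              show pvScan transitions n (pvStep transitions (vis, q) u).2
                    (pvStep transitions (vis, q) u).1
                  = pvScan transitions m (pvStep transitions (vis, q) u).2
                    (pvStep transitions (vis, q) u).1
              have hnu : (pvStep transitions (vis, q) u).2.length
                    + pvPot transitions (pvStep transitions (vis, q) u).1
                  ≤ q.length + pvPot transitions vis := pvStep_nu transitions u (vis, q)
              simp only [List.length_cons] at h1 h2
              exact ih m _ _ (by omega) (by omega)

-- B's layered loop = A's queue BFS, at exact fuel |f| + potential.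
theorem pvLayers_eq_pvScan (transitions : List (List (String × String))) :
    ∀ (fuelL : Nat) (f : List String) (vis : PySem.Set String),
      f.length + pvPot transitions vis ≤ fuelL →
      pvLayers transitions fuelL f vis
        = pvScan transitions (f.length + pvPot transitions vis) f vis := by
  intro fuelL
  induction fuelL with
  | zero =>
      intro f vis h
      have hf : f = [] := by
        cases f with
        | nil => rfl
        | cons a f => simp [List.length_cons] at h
      subst hf
      have hp : pvPot transitions vis = 0 := by simpa using h
      simp [pvLayers, pvScan_nil, hp]
  | succ n ih =>
      intro f vis h
      cases f with
      | nil => simp [pvLayers, pvScan_nil]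
      | cons u f =>
          have hne : (u :: f).isEmpty = false := rfl
          simp only [pvLayers, hne, Bool.false_eq_true, if_false]
          rw [pvLayersFold_eq]
          have hscan := pvScan_layer transitions (u :: f) (pvPot transitions vis) [] vis
          rw [show (u :: f) ++ ([] : List String) = u :: f from by simp] at hscan
          simp only [List.nil_append] at hscan
          rw [hscan]
          have hnu := pvExpand_nu transitions (u :: f) (vis, [])
          simp only [List.length_nil, Nat.zero_add] at hnu
          have hlen : (u :: f).length + pvPot transitions vis ≤ n + 1 := h
          simp only [List.length_cons] at hlen
          rw [pvScan_fuel transitions (pvPot transitions vis)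
              ((pvExpand transitions (u :: f) (vis, [])).2.length
                + pvPot transitions (pvExpand transitions (u :: f) (vis, [])).1)
              _ _ hnu (Nat.le_refl _)]
          exact (ih (pvExpand transitions (u :: f) (vis, [])).2
            (pvExpand transitions (u :: f) (vis, [])).1 (by omega))

-- ===== VERDICT (by name: the statement is the Claim_ definition above) =====
theorem productive_states_spec : Claim_equal_productive_states := by
  intro accept_states transitions _ _
  unfold Spec_productive_states productive_states productive_states_alt
  rw [pvBFS_eq_pvScan]
  have hpot : pvPot transitions (PySem.Set.ofList accept_states) ≤ transitions.length := by
    calc pvPot transitions (PySem.Set.ofList accept_states)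
        ≤ (transitions.map pvFrom).length := List.countP_le_length
      _ = transitions.length := by simp
  rw [pvScan_fuel transitions (accept_states.length + transitions.length)
      (accept_states.length + pvPot transitions (PySem.Set.ofList accept_states))
      accept_states (PySem.Set.ofList accept_states) (by omega) (by omega)]
  exact (pvLayers_eq_pvScan transitions (accept_states.length + transitions.length + 1)
      accept_states (PySem.Set.ofList accept_states) (by omega)).symm
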